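-- pv_equiv track=rewrite | github.com/jramaswami/Binary_Search_Python | two_non_overlapping_lists_with_target_sums.py | solve
-- ===== SOURCE A (Python) =====
-- from math import inf
-- from collections import namedtuple
--
-- Interval = namedtuple('Interval', ['length', 'start', 'end'])
--
-- def intervals_overlap(interval1, interval2):
--     """Return True if intervals overlap."""
--     # |-----|
--     #    |-----|
--     #
--     # |----------|
--     #   |-----|
--     if interval1.start <= interval2.start <= interval1.end:
--         return True
--     #   |-----|
--     #|-----|
--     if interval1.start <= interval2.end <= interval1.end:
--         return True
--     #    |-----|
--     # |-----------|
--     if interval2.start <= interval1.start <= interval2.end: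
--         return True
--     return False
--
-- def solve(nums, k):
--     sums = dict()
--     curr_sum = 0
--     sums[0] = -1
--     intervals = []
--     for j, n in enumerate(nums):
--         curr_sum += n
--         delta = curr_sum - k
--         if delta in sums:
--             i = sums[delta]
--             length = j - i
--             intervals.append(Interval(length, i+1, j))
--         sums[curr_sum] = j
--
--     intervals.sort()
--     soln = inf
--     for i, a in enumerate(intervals):
--         # If twice the length of the current interval is greater than
--         # the current solution we can stop because (1) The current
--         # interval was already paired with a smaller interval or
--         # (2) the current interval must be paired with a larger interval
--         # which will not beat the current solution.
--         if 2 * a.length > soln: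
--             break
--         for j, b in enumerate(intervals[i+1:], start=i+1):
--             if not intervals_overlap(a, b):
--
--                 soln = min(soln, a.length + b.length)
--     return -1 if soln == inf else soln
-- ===== SOURCE B (Python) =====
-- def solve(nums, k):
--     # One pass with a prefix-sum dict: the shortest k-sum subarray ending at each
--     # index pairs with the best (shortest) k-sum subarray ending strictly to its
--     # left, tracked by a running prefix-minimum of lengths per end index.
--     last = {0: -1}
--     best = []          # best[t] = min length of a k-sum subarray ending at index <= t
--     run = None
--     ans = None
--     curr = 0
--     for j, x in enumerate(nums):
--         curr += x
--         if curr - k in last: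
--             i = last[curr - k]
--             length = j - i
--             if i >= 0 and best[i] is not None:
--                 cand = best[i] + length
--                 if ans is None or cand < ans:
--                     ans = cand
--             if run is None or length < run:
--                 run = length
--         best.append(run)
--         last[curr] = j
--     return -1 if ans is None else ans
-- ===== Notes on version B (the rewrite author's own statement) =====
-- stated objective: alternative
-- what changed: Replaces A's collect-all-intervals, sort-by-length and pairwise non-overlap scan with early break by a single left-to-right pass that keeps a per-index prefix-minimum of interval lengths and pairs each newly found k-sum subarray with the best one ending strictly to its left.
import Mathlib
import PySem

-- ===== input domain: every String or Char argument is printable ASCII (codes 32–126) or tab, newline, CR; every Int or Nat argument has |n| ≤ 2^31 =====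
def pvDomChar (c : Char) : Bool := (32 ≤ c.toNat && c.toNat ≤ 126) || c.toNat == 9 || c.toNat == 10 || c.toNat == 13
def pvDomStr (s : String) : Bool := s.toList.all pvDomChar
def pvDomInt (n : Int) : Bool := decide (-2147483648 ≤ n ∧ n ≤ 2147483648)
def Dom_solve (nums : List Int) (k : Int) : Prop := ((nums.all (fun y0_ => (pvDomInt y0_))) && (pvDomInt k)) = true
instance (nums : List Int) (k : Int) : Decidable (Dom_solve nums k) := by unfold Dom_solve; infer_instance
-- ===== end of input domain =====

-- B replaces A's sort-by-length plus pairwise non-overlap scan by one linear pass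
-- keeping a per-index prefix-minimum of subarray lengths (objective: alternative).

-- ===== PORT A =====
-- Interval namedtuple = (length, start, end) : Int × Int × Int

def intervalsOverlap (i1 i2 : Int × Int × Int) : Bool :=
  if i1.2.1 ≤ i2.2.1 ∧ i2.2.1 ≤ i1.2.2 then true
  else if i1.2.1 ≤ i2.2.2 ∧ i2.2.2 ≤ i1.2.2 then true
  else if i2.2.1 ≤ i1.2.1 ∧ i1.2.1 ≤ i2.2.2 then true
  else false

-- one iteration of A's first loop (state: sums dict, curr_sum, intervals)
def solveStepA (k : Int)
    (st : PySem.Dict Int Int × Int × List (Int × Int × Int)) (jn : Int × Int) :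
    PySem.Dict Int Int × Int × List (Int × Int × Int) :=
  let curr := st.2.1 + jn.2
  let delta := curr - k
  let ivs :=
    match st.1.get? delta with
    | some i => st.2.2 ++ [(jn.1 - i, i + 1, jn.1)]
    | none => st.2.2
  (st.1.insert curr jn.1, curr, ivs)

-- Python tuple sort key: lexicographic on (length, start, end)
def ivKey (iv : Int × Int × Int) : Lex (Int × Lex (Int × Int)) :=
  toLex (iv.1, toLex (iv.2.1, iv.2.2))

-- min(soln, v) where soln may be inf (= none)
def minInf (s : Option Int) (v : Int) : Option Int :=
  match s with
  | none => some v
  | some m => some (min m v)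

-- A's double loop with the early break (soln = none is inf, which never triggers the break)
def pairLoop : List (Int × Int × Int) → Option Int → Option Int
  | [], soln => soln
  | a :: rest, soln =>
    if (match soln with | none => false | some s => decide (s < 2 * a.1)) then soln
    else
      pairLoop rest
        (rest.foldl (fun s b => if intervalsOverlap a b then s else minInf s (a.1 + b.1)) soln)

def solve (nums : List Int) (k : Int) : Int :=
  let ivs := ((PySem.List.enumerate nums 0).foldl (solveStepA k)
    ((PySem.Dict.empty : PySem.Dict Int Int).insert 0 (-1), 0, [])).2.2
  match pairLoop (PySem.List.sorted ivs ivKey) none with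
  | none => -1
  | some v => v

-- ===== PORT B =====
-- one iteration of B's single pass (state: last dict, best list, run, ans, curr)
def solveStepB (k : Int)
    (st : PySem.Dict Int Int × List (Option Int) × Option Int × Option Int × Int)
    (jx : Int × Int) :
    PySem.Dict Int Int × List (Option Int) × Option Int × Option Int × Int :=
  let last := st.1
  let best := st.2.1
  let curr := st.2.2.2.2 + jx.2
  let ra :=
    match last.get? (curr - k) with
    | some i =>
      let length := jx.1 - i
      let ans :=
        if 0 ≤ i then
          match PySem.List.pyGetD best i none with
          | some bi =>
            match st.2.2.2.1 with
            | none => some (bi + length)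
            | some a => if bi + length < a then some (bi + length) else some a
          | none => st.2.2.2.1
        else st.2.2.2.1
      let run :=
        match st.2.2.1 with
        | none => some length
        | some r => if length < r then some length else some r
      (run, ans)
    | none => (st.2.2.1, st.2.2.2.1)
  (last.insert curr jx.1, best ++ [ra.1], ra.1, ra.2, curr)

def solve_alt (nums : List Int) (k : Int) : Int :=
  let st := (PySem.List.enumerate nums 0).foldl (solveStepB k)
    ((PySem.Dict.empty : PySem.Dict Int Int).insert 0 (-1), [], none, none, 0)
  match st.2.2.2.1 with
  | none => -1
  | some v => v

-- ===== PRECONDITION & SPEC =====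
def Spec_solve (nums : List Int) (k : Int) (out : Int) : Prop := out = solve_alt nums k
instance (nums : List Int) (k : Int) (out : Int) : Decidable (Spec_solve nums k out) := by
  unfold Spec_solve; infer_instance

-- ===== CLAIM (what is proved, stated in full; the proofs are below) =====
def Claim_equal_solve : Prop := ∀ (nums : List Int) (k : Int), Dom_solve nums k → Spec_solve nums k (solve nums k)

-- ===== LEMMAS AND PROOFS =====

-- shape of every interval produced by the scan: length = end - start + 1, 0 ≤ start ≤ end < j
def IvShape (j : Int) (ivs : List (Int × Int × Int)) : Prop :=
  ∀ iv ∈ ivs, iv.1 = iv.2.2 - iv.2.1 + 1 ∧ 0 ≤ iv.2.1 ∧ iv.2.1 ≤ iv.2.2 ∧ iv.2.2 < j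

-- candidate sums of B's ordered pairs: second interval ends strictly before first starts
def cands (ivs : List (Int × Int × Int)) : List Int :=
  ivs.flatMap (fun a => (ivs.filter (fun b => decide (b.2.2 < a.2.1))).map (fun b => b.1 + a.1))

def mlen (ivs : List (Int × Int × Int)) : Option Int := (ivs.map (fun iv => iv.1)).min?

def mlenTo (ivs : List (Int × Int × Int)) (t : Int) : Option Int :=
  ((ivs.filter (fun b => decide (b.2.2 ≤ t))).map (fun iv => iv.1)).min?

def omin2 : Option Int → Option Int → Option Int
  | none, q => q
  | some a, none => some a
  | some a, some b => some (min a b)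

-- candidate sums of A's i<j pairs of non-overlapping intervals (no sort, no break)
def candsSym : List (Int × Int × Int) → List Int
  | [] => []
  | a :: rest =>
    ((rest.filter (fun b => !intervalsOverlap a b)).map (fun b => a.1 + b.1)) ++ candsSym rest

theorem foldl_minInf_some (cs : List Int) (m : Int) :
    cs.foldl minInf (some m) = some (cs.foldl min m) := by
  induction cs generalizing m with
  | nil => rfl
  | cons c cs ih => simp [List.foldl, minInf, ih]

theorem foldl_minInf_none (cs : List Int) : cs.foldl minInf none = cs.min? := by
  cases cs with
  | nil => rfl
  | cons c cs => simp [List.foldl, minInf, foldl_minInf_some, List.min?]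

theorem min?_append_int (xs ys : List Int) : (xs ++ ys).min? = omin2 xs.min? ys.min? := by
  rw [← foldl_minInf_none (xs ++ ys), List.foldl_append, foldl_minInf_none xs]
  cases hx : xs.min? with
  | none => rw [foldl_minInf_none ys]; cases ys.min? <;> rfl
  | some a =>
    rw [foldl_minInf_some]
    cases hy : ys.min? with
    | none =>
      have : ys = [] := List.min?_eq_none_iff.mp hy
      simp [this, omin2]
    | some b =>
      have h : List.foldl min a ys = a ⊓ ys.min?.getD a := List.foldl_min
      rw [h, hy]; simp [omin2]
theorem min?_mutual (xs ys : List Int)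
    (h1 : ∀ c ∈ xs, ∃ d ∈ ys, d ≤ c) (h2 : ∀ c ∈ ys, ∃ d ∈ xs, d ≤ c) :
    xs.min? = ys.min? := by
  cases hx : xs.min? with
  | none =>
    have hxe : xs = [] := List.min?_eq_none_iff.mp hx
    cases hy : ys.min? with
    | none => rfl
    | some b =>
      have hb := List.min?_mem hy
      obtain ⟨d, hd, _⟩ := h2 b hb
      simp [hxe] at hd
  | some a =>
    obtain ⟨ha, hamin⟩ := List.min?_eq_some_iff.mp hx
    cases hy : ys.min? with
    | none =>
      have hye : ys = [] := List.min?_eq_none_iff.mp hy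
      obtain ⟨d, hd, _⟩ := h1 a ha
      simp [hye] at hd
    | some b =>
      obtain ⟨hb, hbmin⟩ := List.min?_eq_some_iff.mp hy
      obtain ⟨d, hd, hda⟩ := h1 a ha
      obtain ⟨e, he, heb⟩ := h2 b hb
      have : a = b := le_antisymm (le_trans (hamin e he) heb) (le_trans (hbmin d hd) hda)
      rw [this]
theorem min?_map_add (xs : List Int) (c : Int) :
    (xs.map (fun x => x + c)).min? = xs.min?.map (fun x => x + c) := by
  cases hx : xs.min? with
  | none => simp [List.min?_eq_none_iff.mp hx]
  | some a =>
    obtain ⟨ha, hamin⟩ := List.min?_eq_some_iff.mp hx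
    refine List.min?_eq_some_iff.mpr ⟨List.mem_map_of_mem ha, ?_⟩
    rintro b hb
    obtain ⟨x, hx', rfl⟩ := List.mem_map.mp hb
    have := hamin x hx'
    show a + c ≤ x + c
    omega

theorem overlap_false_iff (a b : Int × Int × Int)
    (ha : a.2.1 ≤ a.2.2) (hb : b.2.1 ≤ b.2.2) :
    intervalsOverlap a b = false ↔ (a.2.2 < b.2.1 ∨ b.2.2 < a.2.1) := by
  simp only [intervalsOverlap]
  split_ifs with h1 h2 h3 <;> constructor <;> intro h <;> first | omega | rfl | simp_all

theorem mem_cands (c : Int) (l : List (Int × Int × Int)) :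
    c ∈ cands l ↔ ∃ a ∈ l, ∃ b ∈ l, b.2.2 < a.2.1 ∧ c = b.1 + a.1 := by
  simp only [cands, List.mem_flatMap, List.mem_map, List.mem_filter, decide_eq_true_eq]
  constructor
  · rintro ⟨a, ha, b, ⟨hb, hlt⟩, rfl⟩; exact ⟨a, ha, b, hb, hlt, rfl⟩
  · rintro ⟨a, ha, b, hb, hlt, rfl⟩; exact ⟨a, ha, b, ⟨hb, hlt⟩, rfl⟩

theorem mem_candsSym (c : Int) (l : List (Int × Int × Int)) (h : c ∈ candsSym l) :
    ∃ a ∈ l, ∃ b ∈ l, intervalsOverlap a b = false ∧ c = a.1 + b.1 := by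
  induction l with
  | nil => simp [candsSym] at h
  | cons a rest ih =>
    rw [candsSym] at h
    rcases List.mem_append.mp h with h1 | h2
    · obtain ⟨b, hb, rfl⟩ := List.mem_map.mp h1
      obtain ⟨hbr, hno⟩ := List.mem_filter.mp hb
      exact ⟨a, List.mem_cons_self, b, List.mem_cons_of_mem _ hbr, by simpa using hno, rfl⟩
    · obtain ⟨x, hx, y, hy, hxy, rfl⟩ := ih h2
      exact ⟨x, List.mem_cons_of_mem _ hx, y, List.mem_cons_of_mem _ hy, hxy, rfl⟩

theorem candsSym_intro (l : List (Int × Int × Int)) (a b : Int × Int × Int)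
    (ha : a ∈ l) (hb : b ∈ l) (hne : a ≠ b)
    (hab : intervalsOverlap a b = false) (hba : intervalsOverlap b a = false) :
    (a.1 + b.1) ∈ candsSym l ∨ (b.1 + a.1) ∈ candsSym l := by
  induction l with
  | nil => simp at ha
  | cons h t ih =>
    rw [candsSym]
    rcases List.mem_cons.mp ha with rfl | hat
    · have hbt : b ∈ t := by
        rcases List.mem_cons.mp hb with rfl | hbt
        · exact absurd rfl hne
        · exact hbt
      left
      exact List.mem_append_left _
        (List.mem_map.mpr ⟨b, List.mem_filter.mpr ⟨hbt, by simp [hab]⟩, rfl⟩)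
    · rcases List.mem_cons.mp hb with rfl | hbt
      · right
        exact List.mem_append_left _
          (List.mem_map.mpr ⟨a, List.mem_filter.mpr ⟨hat, by simp [hba]⟩, rfl⟩)
      · rcases ih hat hbt with h1 | h1
        · exact Or.inl (List.mem_append_right _ h1)
        · exact Or.inr (List.mem_append_right _ h1)

theorem foldl_min_keep (cs : List Int) (m : Int) (h : ∀ c ∈ cs, m ≤ c) :
    cs.foldl min m = m := by
  rw [List.foldl_min]
  cases hc : cs.min? with
  | none => simp
  | some b => have := h b (List.min?_mem hc); simp; omega

theorem pairLoop_cons (a : Int × Int × Int) (rest : List (Int × Int × Int)) (soln : Option Int) :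
    pairLoop (a :: rest) soln =
      if (match soln with | none => false | some s => decide (s < 2 * a.1)) then soln
      else pairLoop rest
        (rest.foldl (fun s b => if intervalsOverlap a b then s else minInf s (a.1 + b.1)) soln) := rfl

theorem pairLoop_eq_foldl (l : List (Int × Int × Int)) (soln : Option Int)
    (hp : l.Pairwise (fun a b => a.1 ≤ b.1)) :
    pairLoop l soln = (candsSym l).foldl minInf soln := by
  induction l generalizing soln with
  | nil => rfl
  | cons a rest ih =>
    have hlen : ∀ b ∈ rest, a.1 ≤ b.1 := fun b hb => List.rel_of_pairwise_cons hp hb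
    have hp' : rest.Pairwise (fun a b => a.1 ≤ b.1) := hp.of_cons
    have hcommon : pairLoop rest
          (rest.foldl (fun s b => if intervalsOverlap a b then s else minInf s (a.1 + b.1)) soln)
        = (candsSym (a :: rest)).foldl minInf soln := by
      rw [candsSym, List.foldl_append, ih _ hp']
      congr 1
      rw [List.foldl_map, List.foldl_filter]
      congr 1
      funext s b
      cases hov : intervalsOverlap a b <;> simp
    rw [pairLoop_cons]
    cases soln with
    | none => simpa using hcommon
    | some s =>
      by_cases hs : s < 2 * a.1
      · simp only [hs, decide_true, if_true]
        have hall : ∀ c ∈ candsSym (a :: rest), s ≤ c := by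
          intro c hc
          obtain ⟨x, hx, y, hy, _, rfl⟩ := mem_candsSym c _ hc
          have hx1 : a.1 ≤ x.1 := by
            rcases List.mem_cons.mp hx with rfl | hx'
            · exact le_refl _
            · exact hlen _ hx'
          have hy1 : a.1 ≤ y.1 := by
            rcases List.mem_cons.mp hy with rfl | hy'
            · exact le_refl _
            · exact hlen _ hy'
          omega
        rw [foldl_minInf_some, foldl_min_keep _ _ hall]
      · simp only [hs, decide_false, Bool.false_eq_true, if_false]
        exact hcommon

-- A's pair phase equals the minimum of B's ordered candidate sums
theorem phase2_eq (ivs : List (Int × Int × Int))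
    (hs : ∀ iv ∈ ivs, iv.1 = iv.2.2 - iv.2.1 + 1 ∧ 0 ≤ iv.2.1 ∧ iv.2.1 ≤ iv.2.2) :
    pairLoop (PySem.List.sorted ivs ivKey) none = (cands ivs).min? := by
  have hmem : ∀ x, x ∈ PySem.List.sorted ivs ivKey ↔ x ∈ ivs :=
    fun x => PySem.List.mem_sorted ivs ivKey false x
  have hpw : (PySem.List.sorted ivs ivKey).Pairwise (fun a b => a.1 ≤ b.1) := by
    refine (PySem.List.sorted_pairwise ivs ivKey).imp ?_
    intro a b h
    rcases Prod.Lex.le_iff.mp h with h' | ⟨h', _⟩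
    · exact le_of_lt h'
    · exact le_of_eq h'
  rw [pairLoop_eq_foldl _ _ hpw, foldl_minInf_none]
  apply min?_mutual
  · intro c hc
    obtain ⟨a, ha, b, hb, hno, rfl⟩ := mem_candsSym c _ hc
    have ha' := (hmem a).mp ha
    have hb' := (hmem b).mp hb
    obtain ⟨_, _, hsa⟩ := hs a ha'
    obtain ⟨_, _, hsb⟩ := hs b hb'
    rcases (overlap_false_iff a b hsa hsb).mp hno with hlt | hlt
    · exact ⟨a.1 + b.1, (mem_cands _ _).mpr ⟨b, hb', a, ha', hlt, by ring⟩, le_refl _⟩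
    · exact ⟨a.1 + b.1, (mem_cands _ _).mpr ⟨a, ha', b, hb', hlt, by ring⟩, le_refl _⟩
  · intro c hc
    obtain ⟨a, ha, b, hb, hlt, rfl⟩ := (mem_cands c ivs).mp hc
    obtain ⟨_, _, hsa⟩ := hs a ha
    obtain ⟨_, _, hsb⟩ := hs b hb
    have hne : a ≠ b := by
      intro h; rw [h] at hlt; omega
    have hab : intervalsOverlap a b = false :=
      (overlap_false_iff a b hsa hsb).mpr (Or.inr hlt)
    have hba : intervalsOverlap b a = false :=
      (overlap_false_iff b a hsb hsa).mpr (Or.inl hlt)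
    rcases candsSym_intro _ a b ((hmem a).mpr ha) ((hmem b).mpr hb) hne hab hba with h1 | h1
    · exact ⟨a.1 + b.1, h1, by omega⟩
    · exact ⟨b.1 + a.1, h1, le_refl _⟩

theorem mlenTo_all (j t : Int) (ivs : List (Int × Int × Int))
    (hs : IvShape j ivs) (ht : j ≤ t + 1) : mlenTo ivs t = mlen ivs := by
  unfold mlenTo mlen
  congr 1
  rw [List.filter_eq_self.mpr]
  intro b hb
  have := hs b hb
  simp only [decide_eq_true_eq]
  omega

theorem mlenTo_append_high (t : Int) (ivs : List (Int × Int × Int)) (a : Int × Int × Int)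
    (h : ¬ (a.2.2 ≤ t)) : mlenTo (ivs ++ [a]) t = mlenTo ivs t := by
  unfold mlenTo
  rw [List.filter_append]
  simp [List.filter, h]

theorem cands_append (ivs : List (Int × Int × Int)) (a : Int × Int × Int)
    (hx : ∀ x ∈ ivs, ¬ (a.2.2 < x.2.1)) (hself : ¬ (a.2.2 < a.2.1)) :
    cands (ivs ++ [a]) =
      cands ivs ++ (ivs.filter (fun b => decide (b.2.2 < a.2.1))).map (fun b => b.1 + a.1) := by
  unfold cands
  rw [List.flatMap_append]
  congr 1
  · apply List.flatMap_congr
    intro x hxm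
    rw [List.filter_append]
    simp [List.filter, hx x hxm]
  · simp only [List.flatMap_cons, List.flatMap_nil, List.append_nil]
    rw [List.filter_append]
    simp [List.filter, hself]

def bestSpec (ivs : List (Int × Int × Int)) (m : Nat) : List (Option Int) :=
  (List.range m).map (fun t : Nat => mlenTo ivs (t : Int))

theorem bestSpec_succ (ivs : List (Int × Int × Int)) (m : Nat)
    (h : mlenTo ivs (m : Int) = mlen ivs) :
    bestSpec ivs (m + 1) = bestSpec ivs m ++ [mlen ivs] := by
  unfold bestSpec
  rw [List.range_succ, List.map_append]
  simp [h]

theorem bestSpec_congr (ivs : List (Int × Int × Int)) (a : Int × Int × Int) (m : Nat)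
    (h : ∀ t : Nat, t < m → ¬ (a.2.2 ≤ (t : Int))) :
    bestSpec (ivs ++ [a]) m = bestSpec ivs m := by
  unfold bestSpec
  apply List.map_congr_left
  intro t ht
  exact mlenTo_append_high _ _ _ (h t (List.mem_range.mp ht))

theorem bestSpec_get (ivs : List (Int × Int × Int)) (m : Nat) (i : Int)
    (h0 : 0 ≤ i) (h1 : i < (m : Int)) :
    PySem.List.pyGetD (bestSpec ivs m) i none = mlenTo ivs i := by
  have hlen : i < ((bestSpec ivs m).length : Int) := by
    unfold bestSpec; simp; omega
  rw [PySem.List.pyGetD_eq_getElem _ _ h0 hlen]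
  unfold bestSpec
  have hti : i.toNat < (List.range m).length := by simp; omega
  rw [List.getElem_map]
  simp only [List.getElem_range]
  congr 1
  omega

theorem mergeMatch (o : Option Int) (v : Int) :
    (match o with | none => some v | some r => if v < r then some v else some r)
      = omin2 o (some v) := by
  cases o with
  | none => rfl
  | some r =>
    simp only [omin2]
    split_ifs with h <;> (congr 1; omega)

theorem mlen_append (ivs : List (Int × Int × Int)) (a : Int × Int × Int) :
    mlen (ivs ++ [a]) = omin2 (mlen ivs) (some a.1) := by
  unfold mlen
  rw [List.map_append, min?_append_int]
  rfl

-- the simulation invariant between A's scan state and B's single-pass state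
theorem foldSim (k : Int) (l : List Int) :
    ∀ (m : Nat) (sums : PySem.Dict Int Int) (curr : Int) (ivs : List (Int × Int × Int)),
    (∀ p ∈ sums.items, -1 ≤ p.2 ∧ p.2 < (m : Int)) →
    IvShape (m : Int) ivs →
    ((PySem.List.enumerate l (m : Int)).foldl (solveStepB k)
        (sums, bestSpec ivs m, mlen ivs, (cands ivs).min?, curr)
      = (let stA := (PySem.List.enumerate l (m : Int)).foldl (solveStepA k) (sums, curr, ivs)
         (stA.1, bestSpec stA.2.2 (m + l.length),
          mlen stA.2.2, (cands stA.2.2).min?, stA.2.1)))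
      ∧ IvShape ((m : Int) + l.length)
          ((PySem.List.enumerate l (m : Int)).foldl (solveStepA k) (sums, curr, ivs)).2.2 := by
  induction l with
  | nil =>
    intro m sums curr ivs hd hs
    refine ⟨?_, ?_⟩
    · simp [PySem.List.enumerate_nil]
    · simpa [PySem.List.enumerate_nil] using hs
  | cons x xs ih =>
    intro m sums curr ivs hd hs
    rw [PySem.List.enumerate_cons]
    simp only [List.foldl_cons]
    have hcast : (m : Int) + 1 = ((m + 1 : Nat) : Int) := by push_cast; ring
    have harr : m + (x :: xs).length = (m + 1) + xs.length := by
      simp [List.length_cons]; omega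
    have hcastlen : (m : Int) + ((x :: xs).length : Int) = ((m + 1 : Nat) : Int) + (xs.length : Int) := by
      push_cast [List.length_cons]; ring
    cases hget : sums.get? (curr + x - k) with
    | none =>
      have hA : solveStepA k (sums, curr, ivs) ((m : Int), x)
          = (sums.insert (curr + x) (m : Int), curr + x, ivs) := by
        simp [solveStepA, hget]
      have hB : solveStepB k
            (sums, bestSpec ivs m, mlen ivs, (cands ivs).min?, curr)
            ((m : Int), x)
          = (sums.insert (curr + x) (m : Int),
             bestSpec ivs (m + 1), mlen ivs, (cands ivs).min?, curr + x) := by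
        simp only [solveStepB, hget]
        rw [bestSpec_succ ivs m (mlenTo_all (m : Int) (m : Int) ivs hs (by omega))]
      rw [hA, hB, hcast, harr, hcastlen]
      have hd' : ∀ p ∈ (sums.insert (curr + x) (m : Int)).items, -1 ≤ p.2 ∧ p.2 < ((m + 1 : Nat) : Int) := by
        intro p hp
        rcases (PySem.Dict.mem_items_insert sums _ _ p).mp hp with rfl | ⟨hpo, _⟩
        · constructor <;> [omega; (push_cast; omega)]
        · have := hd p hpo; constructor <;> [omega; (push_cast; omega)]
      have hs' : IvShape ((m + 1 : Nat) : Int) ivs := by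
        intro iv hiv; have := hs iv hiv; push_cast; push_cast at this; omega
      exact ih (m + 1) _ (curr + x) ivs hd' hs'
    | some i =>
      have hi : -1 ≤ i ∧ i < (m : Int) :=
        hd (curr + x - k, i) (PySem.Dict.mem_items_of_get?_eq_some sums hget)
      have hA : solveStepA k (sums, curr, ivs) ((m : Int), x)
          = (sums.insert (curr + x) (m : Int), curr + x, ivs ++ [((m : Int) - i, i + 1, (m : Int))]) := by
        simp [solveStepA, hget]
      have hs1 : IvShape ((m : Int) + 1) (ivs ++ [((m : Int) - i, i + 1, (m : Int))]) := by
        intro iv hiv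
        rcases List.mem_append.mp hiv with h1 | h1
        · have := hs iv h1; omega
        · have : iv = ((m : Int) - i, i + 1, (m : Int)) := List.mem_singleton.mp h1
          subst this; simp; omega
      have hs' : IvShape (((m + 1 : Nat) : Int)) (ivs ++ [((m : Int) - i, i + 1, (m : Int))]) := by
        rw [← hcast]; exact hs1
      have hrun : (match mlen ivs with
            | none => some ((m : Int) - i)
            | some r => if (m : Int) - i < r then some ((m : Int) - i) else some r)
          = mlen (ivs ++ [((m : Int) - i, i + 1, (m : Int))]) := by
        rw [mergeMatch, mlen_append]
      have hbest : bestSpec ivs m ++ [mlen (ivs ++ [((m : Int) - i, i + 1, (m : Int))])]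
          = bestSpec (ivs ++ [((m : Int) - i, i + 1, (m : Int))]) (m + 1) := by
        rw [bestSpec_succ _ m (mlenTo_all ((m : Int) + 1) (m : Int) _ hs1 (by omega)),
            bestSpec_congr ivs _ m (by intro t ht; simp; omega)]
      have hblock : ((ivs.filter (fun b => decide (b.2.2 < i + 1))).map
            (fun b => b.1 + ((m : Int) - i))).min?
          = (mlenTo ivs i).map (fun v => v + ((m : Int) - i)) := by
        have hf : ivs.filter (fun b => decide (b.2.2 < i + 1)) = ivs.filter (fun b => decide (b.2.2 ≤ i)) := by
          apply List.filter_congr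
          intro b _
          simp
        rw [hf, show (fun (b : Int × Int × Int) => b.1 + ((m : Int) - i))
              = (fun v => v + ((m : Int) - i)) ∘ (fun (b : Int × Int × Int) => b.1) from rfl,
            ← List.map_map, min?_map_add]
        rfl
      have hcands : (cands (ivs ++ [((m : Int) - i, i + 1, (m : Int))])).min?
          = omin2 (cands ivs).min? ((mlenTo ivs i).map (fun v => v + ((m : Int) - i))) := by
        rw [cands_append ivs _ (by intro y hy; have := hs y hy; simp; omega) (by simp; omega),
            min?_append_int, hblock]
      have hans : (if 0 ≤ i then
            (match PySem.List.pyGetD (bestSpec ivs m) i none with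
             | some bi =>
               (match (cands ivs).min? with
                | none => some (bi + ((m : Int) - i))
                | some a0 => if bi + ((m : Int) - i) < a0 then some (bi + ((m : Int) - i)) else some a0)
             | none => (cands ivs).min?)
          else (cands ivs).min?)
          = (cands (ivs ++ [((m : Int) - i, i + 1, (m : Int))])).min? := by
        rw [hcands]
        by_cases h0 : 0 ≤ i
        · rw [if_pos h0, bestSpec_get ivs m i h0 hi.2]
          cases hbi : mlenTo ivs i with
          | none => cases (cands ivs).min? <;> rfl
          | some bi =>
            show (match (cands ivs).min? with
                  | none => some (bi + ((m : Int) - i))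
                  | some a0 => if bi + ((m : Int) - i) < a0 then some (bi + ((m : Int) - i)) else some a0)
                = omin2 (cands ivs).min? (Option.map (fun v => v + ((m : Int) - i)) (some bi))
            rw [mergeMatch]
            rfl
        · rw [if_neg h0]
          have hmt : mlenTo ivs i = none := by
            unfold mlenTo
            rw [List.filter_eq_nil_iff.mpr]
            · rfl
            · intro b hb
              have := hs b hb
              simp
              omega
          rw [hmt]
          cases (cands ivs).min? <;> rfl
      have hB : solveStepB k
            (sums, bestSpec ivs m, mlen ivs, (cands ivs).min?, curr)
            ((m : Int), x)
          = (sums.insert (curr + x) (m : Int),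
             bestSpec (ivs ++ [((m : Int) - i, i + 1, (m : Int))]) (m + 1),
             mlen (ivs ++ [((m : Int) - i, i + 1, (m : Int))]),
             (cands (ivs ++ [((m : Int) - i, i + 1, (m : Int))])).min?, curr + x) := by
        simp only [solveStepB, hget]
        rw [hrun, hans, hbest]
      rw [hA, hB, hcast, harr, hcastlen]
      have hd' : ∀ p ∈ (sums.insert (curr + x) (m : Int)).items, -1 ≤ p.2 ∧ p.2 < ((m + 1 : Nat) : Int) := by
        intro p hp
        rcases (PySem.Dict.mem_items_insert sums _ _ p).mp hp with rfl | ⟨hpo, _⟩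
        · constructor <;> [omega; (push_cast; omega)]
        · have := hd p hpo; constructor <;> [omega; (push_cast; omega)]
      exact ih (m + 1) _ (curr + x) _ hd' hs'

-- ===== VERDICT (by name: the statement is the Claim_ definition above) =====
theorem solve_spec : Claim_equal_solve := by
  intro nums k _
  unfold Spec_solve solve solve_alt
  dsimp only
  have hd0 : ∀ p ∈ ((PySem.Dict.empty : PySem.Dict Int Int).insert 0 (-1)).items,
      -1 ≤ p.2 ∧ p.2 < ((0 : Nat) : Int) := by
    intro p hp
    rcases (PySem.Dict.mem_items_insert _ _ _ p).mp hp with rfl | ⟨hpo, _⟩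
    · simp
    · have he : (PySem.Dict.empty : PySem.Dict Int Int).items = [] := rfl
      rw [he] at hpo
      exact absurd hpo (List.not_mem_nil)
  obtain ⟨hEq, hShape⟩ := foldSim k nums 0 ((PySem.Dict.empty : PySem.Dict Int Int).insert 0 (-1)) 0 []
    hd0 (by intro iv h; exact absurd h (List.not_mem_nil))
  simp only [Nat.cast_zero] at hEq hShape
  have hproj : ((PySem.List.enumerate nums 0).foldl (solveStepB k)
        ((PySem.Dict.empty : PySem.Dict Int Int).insert 0 (-1), [], none, none, 0)).2.2.2.1
      = (cands ((PySem.List.enumerate nums 0).foldl (solveStepA k)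
        ((PySem.Dict.empty : PySem.Dict Int Int).insert 0 (-1), 0, [])).2.2).min? :=
    congrArg (fun st => st.2.2.2.1) hEq
  rw [hproj]
  have hs3 : ∀ iv ∈ ((PySem.List.enumerate nums 0).foldl (solveStepA k)
      ((PySem.Dict.empty : PySem.Dict Int Int).insert 0 (-1), 0, [])).2.2,
      iv.1 = iv.2.2 - iv.2.1 + 1 ∧ 0 ≤ iv.2.1 ∧ iv.2.1 ≤ iv.2.2 := by
    intro iv h
    have := hShape iv h
    exact ⟨this.1, this.2.1, this.2.2.1⟩
  rw [phase2_eq _ hs3]
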